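-- pv_equiv track=rewrite | github.com/SteveDraper/Planets-Console | packages/api/api/concepts/planet_connections.py | _iter_circular_index_zigzag
-- ===== SOURCE A (Python) =====
-- from collections.abc import Iterator
--
-- def _iter_circular_index_zigzag(n: int, s: int) -> Iterator[int]:
--     """All indices 0..n-1, starting at ``s``, expanding by ±1 on the ring each step."""
--     if n == 0:
--         return
--     if n == 1:
--         yield s
--         return
--     seen: set[int] = {s}
--     yield s
--     for k in range(1, n):
--         for j in ((s + k) % n, (s - k) % n):
--             if j in seen:
--                 continue
--             seen.add(j)
--             yield j
--             if len(seen) >= n: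
--                 return
-- ===== SOURCE B (Python) =====
-- def _iter_circular_index_zigzag(n: int, s: int):
--     """All indices 0..n-1, starting at ``s``, expanding by ±1 on the ring each step."""
--     if n == 0:
--         return
--     if n == 1:
--         yield s
--         return
--     yield s
--     for k in range(1, n // 2 + 1):
--         a = (s + k) % n
--         b = (s - k) % n
--         yield a
--         if b != a:
--             yield b
-- ===== Notes on version B (the rewrite author's own statement) =====
-- stated objective: simpler
-- what changed: B drops A's visited-set and length-based early return entirely: it loops k only up to n//2, always yields (s+k)%n and yields (s-k)%n unless the two meet arithmetically, so the set, the membership test and half the loop iterations disappear.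
import Mathlib
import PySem

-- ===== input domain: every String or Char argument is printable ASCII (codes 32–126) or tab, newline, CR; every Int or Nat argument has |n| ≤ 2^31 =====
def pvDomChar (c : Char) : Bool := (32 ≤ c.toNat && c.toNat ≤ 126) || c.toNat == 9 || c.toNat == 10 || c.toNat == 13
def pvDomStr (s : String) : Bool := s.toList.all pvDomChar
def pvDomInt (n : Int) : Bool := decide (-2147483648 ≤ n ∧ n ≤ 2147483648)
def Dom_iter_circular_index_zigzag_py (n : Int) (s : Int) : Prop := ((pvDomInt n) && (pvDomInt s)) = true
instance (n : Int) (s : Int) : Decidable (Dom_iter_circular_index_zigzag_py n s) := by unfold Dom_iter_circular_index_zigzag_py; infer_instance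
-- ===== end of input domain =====

-- B replaces A's visited-set bookkeeping by a half-length arithmetic loop (simpler; same O(n) work).

-- ===== PORT A =====
-- one iteration of A's inner 'for j in (a, b)' body: (seen, acc, j) ↦ (seen', acc', early-return?)
def pvStepA (n : Int) (seen : PySem.Set Int) (acc : List Int) (j : Int) :
    PySem.Set Int × List Int × Bool :=
  if PySem.Set.contains seen j then (seen, acc, false)
  else
    let seen' := PySem.Set.add seen j
    (seen', acc ++ [j], decide (n ≤ PySem.Set.len seen'))

-- A's outer 'for k in range(1, n)' loop with its early 'return'
def pvLoopA (n s : Int) : List Int → PySem.Set Int → List Int → List Int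
  | [], _, acc => acc
  | k :: ks, seen, acc =>
    match pvStepA n seen acc (PySem.Int.mod (s + k) n) with
    | (seen1, acc1, true) => acc1
    | (seen1, acc1, false) =>
      match pvStepA n seen1 acc1 (PySem.Int.mod (s - k) n) with
      | (seen2, acc2, true) => acc2
      | (seen2, acc2, false) => pvLoopA n s ks seen2 acc2

def iter_circular_index_zigzag_py (n : Int) (s : Int) : List Int :=
  if n = 0 then []
  else if n = 1 then [s]
  else pvLoopA n s (PySem.List.pyRange 1 n 1) (PySem.Set.ofList [s]) [s]

-- ===== PORT B =====
def iter_circular_index_zigzag_py_alt (n : Int) (s : Int) : List Int :=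
  if n = 0 then []
  else if n = 1 then [s]
  else
    s :: (PySem.List.pyRange 1 (PySem.Int.floordiv n 2 + 1) 1).foldl
      (fun acc k =>
        let a := PySem.Int.mod (s + k) n
        let b := PySem.Int.mod (s - k) n
        acc ++ [a] ++ (if b ≠ a then [b] else [])) []

-- ===== PRECONDITION & SPEC =====
def Spec_iter_circular_index_zigzag_py (n : Int) (s : Int) (out : List Int) : Prop := out = iter_circular_index_zigzag_py_alt n s
instance (n : Int) (s : Int) (out : List Int) : Decidable (Spec_iter_circular_index_zigzag_py n s out) := by unfold Spec_iter_circular_index_zigzag_py; infer_instance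

-- ===== CLAIM (what is proved, stated in full; the proofs are below) =====
def Claim_equal_iter_circular_index_zigzag_py : Prop := ∀ (n : Int) (s : Int), Dom_iter_circular_index_zigzag_py n s → Spec_iter_circular_index_zigzag_py n s (iter_circular_index_zigzag_py n s)

-- ===== LEMMAS AND PROOFS =====

-- a % n ≠ b % n when n does not divide a - b
theorem pv_mod_ne {n a b : Int} (hn : 0 < n) (hd : ¬ n ∣ (a - b)) :
    PySem.Int.mod a n ≠ PySem.Int.mod b n := by
  rw [PySem.Int.mod_eq_emod_of_pos hn, PySem.Int.mod_eq_emod_of_pos hn]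
  intro h
  exact hd (Int.dvd_of_emod_eq_zero (Int.emod_eq_emod_iff_emod_sub_eq_zero.mp h))

theorem pv_ndvd {n d : Int} (h1 : 0 < d) (h2 : d < n) : ¬ n ∣ d := by
  intro h; have := Int.le_of_dvd h1 h; omega

-- (s ± k) % n never equals the raw start s for 1 ≤ k < n
theorem pv_mod_ne_s {n s k : Int} (hn : 0 < n) (h1 : 1 ≤ k) (h2 : k < n) :
    PySem.Int.mod (s + k) n ≠ s ∧ PySem.Int.mod (s - k) n ≠ s := by
  constructor <;> intro h
  · have hb1 := PySem.Int.mod_nonneg (s + k) hn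
    have hb2 := PySem.Int.mod_lt (s + k) hn
    have hs : PySem.Int.mod s n = s := by
      rw [PySem.Int.mod_eq_emod_of_pos hn]; exact Int.emod_eq_of_lt (by omega) (by omega)
    have := pv_mod_ne (a := s + k) (b := s) hn (pv_ndvd (by omega) (by omega))
    rw [hs] at this; exact this h
  · have hb1 := PySem.Int.mod_nonneg (s - k) hn
    have hb2 := PySem.Int.mod_lt (s - k) hn
    have hs : PySem.Int.mod s n = s := by
      rw [PySem.Int.mod_eq_emod_of_pos hn]; exact Int.emod_eq_of_lt (by omega) (by omega)
    have := pv_mod_ne (a := s) (b := s - k) hn (pv_ndvd (by omega) (by omega))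
    rw [hs] at this; exact this h.symm

-- the set A maintains after j full iterations of the outer loop (both branches fresh)
def pvSeen (n s : Int) : Nat → PySem.Set Int
  | 0 => PySem.Set.ofList [s]
  | j + 1 =>
      PySem.Set.add
        (PySem.Set.add (pvSeen n s j) (PySem.Int.mod (s + ((j : Int) + 1)) n))
        (PySem.Int.mod (s - ((j : Int) + 1)) n)

-- the output A has accumulated after j full iterations
def pvAcc (n s : Int) : Nat → List Int
  | 0 => [s]
  | j + 1 => pvAcc n s j ++
      [PySem.Int.mod (s + ((j : Int) + 1)) n, PySem.Int.mod (s - ((j : Int) + 1)) n]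

theorem pv_mem_seen {n s : Int} {j : Nat} {x : Int} :
    x ∈ pvSeen n s j ↔ x = s ∨ ∃ i : Nat, 1 ≤ i ∧ i ≤ j ∧
      (x = PySem.Int.mod (s + (i : Int)) n ∨ x = PySem.Int.mod (s - (i : Int)) n) := by
  induction j with
  | zero =>
    simp only [pvSeen, PySem.Set.mem_ofList, List.mem_singleton]
    constructor
    · exact fun h => Or.inl h
    · rintro (h | ⟨i, h1, h2, _⟩)
      · exact h
      · omega
  | succ j ih =>
    constructor
    · intro hx
      simp only [pvSeen] at hx
      rcases (PySem.Set.mem_add _ _ _).mp hx with h1 | hb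
      · rcases (PySem.Set.mem_add _ _ _).mp h1 with h2 | ha
        · rcases ih.mp h2 with h | ⟨i, hi1, hi2, hi3⟩
          · exact Or.inl h
          · exact Or.inr ⟨i, hi1, by omega, hi3⟩
        · exact Or.inr ⟨j + 1, by omega, le_refl _, Or.inl (by push_cast; exact ha)⟩
      · exact Or.inr ⟨j + 1, by omega, le_refl _, Or.inr (by push_cast; exact hb)⟩
    · intro hx
      simp only [pvSeen]
      apply (PySem.Set.mem_add _ _ _).mpr
      rcases hx with h | ⟨i, hi1, hi2, hi3⟩
      · exact Or.inl ((PySem.Set.mem_add _ _ _).mpr (Or.inl (ih.mpr (Or.inl h))))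
      · rcases Nat.lt_or_ge i (j + 1) with hlt | hge
        · exact Or.inl ((PySem.Set.mem_add _ _ _).mpr
            (Or.inl (ih.mpr (Or.inr ⟨i, hi1, by omega, hi3⟩))))
        · have hij : i = j + 1 := by omega
          subst hij
          rcases hi3 with h3 | h3
          · exact Or.inl ((PySem.Set.mem_add _ _ _).mpr
              (Or.inr (by push_cast at h3 ⊢; exact h3)))
          · exact Or.inr (by push_cast at h3 ⊢; exact h3)

-- freshness of the '+' candidate at step k = j+1 (k ≤ n/2 suffices: 2k - 1 < n)
theorem pv_fresh_plus {n s : Int} {j : Nat} (hn : 0 < n)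
    (hk : 2 * ((j : Int) + 1) - 1 < n) :
    PySem.Int.mod (s + ((j : Int) + 1)) n ∉ pvSeen n s j := by
  rw [pv_mem_seen]
  push_neg
  refine ⟨(pv_mod_ne_s hn (by omega) (by omega)).1, ?_⟩
  rintro i h1 h2
  constructor
  · exact pv_mod_ne hn (pv_ndvd (by omega) (by omega))
  · exact pv_mod_ne hn (pv_ndvd (by omega) (by omega))

-- freshness of the '-' candidate at step k = j+1, including (s-k)%n ≠ (s+k)%n (needs 2k < n)
theorem pv_fresh_minus {n s : Int} {j : Nat} (hn : 0 < n)
    (hk : 2 * ((j : Int) + 1) < n) :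
    PySem.Int.mod (s - ((j : Int) + 1)) n ∉ pvSeen n s j ∧
    PySem.Int.mod (s - ((j : Int) + 1)) n ≠ PySem.Int.mod (s + ((j : Int) + 1)) n := by
  constructor
  · rw [pv_mem_seen]
    push_neg
    refine ⟨(pv_mod_ne_s hn (by omega) (by omega)).2, ?_⟩
    rintro i h1 h2
    constructor
    · exact (pv_mod_ne hn (pv_ndvd (by omega) (by omega))).symm
    · exact (pv_mod_ne hn (pv_ndvd (by omega) (by omega))).symm
  · exact (pv_mod_ne hn (pv_ndvd (by omega) (by omega))).symm

theorem pv_len_append (t : PySem.Set Int) (x : Int) :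
    PySem.Set.len (t ++ [x]) = PySem.Set.len t + 1 := by
  simp [PySem.Set.len]

theorem pv_len_seen {n s : Int} (hn : 0 < n) :
    ∀ j : Nat, 2 * (j : Int) < n → PySem.Set.len (pvSeen n s j) = 2 * (j : Int) + 1 := by
  intro j
  induction j with
  | zero => intro _; rfl
  | succ j ih =>
    intro hj
    push_cast at hj
    have hfp := pv_fresh_plus (n := n) (s := s) (j := j) hn (by omega)
    have hfm := pv_fresh_minus (n := n) (s := s) (j := j) hn (by omega)
    have hm2 : PySem.Int.mod (s - ((j : Int) + 1)) n ∉
        pvSeen n s j ++ [PySem.Int.mod (s + ((j : Int) + 1)) n] := by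
      rw [← PySem.Set.add_of_not_mem hfp, PySem.Set.mem_add]
      rintro (h | h)
      · exact hfm.1 h
      · exact hfm.2 h
    have hadd1 : PySem.Set.add (pvSeen n s j) (PySem.Int.mod (s + ((j : Int) + 1)) n) =
        pvSeen n s j ++ [PySem.Int.mod (s + ((j : Int) + 1)) n] :=
      PySem.Set.add_of_not_mem hfp
    simp only [pvSeen, hadd1, PySem.Set.add_of_not_mem hm2, pv_len_append]
    rw [ih (by omega)]
    push_cast
    ring

-- one iteration of A's inner body on a fresh candidate
theorem pv_stepA_eq {n : Int} {seen : PySem.Set Int} {acc : List Int} {j : Int}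
    (h : j ∉ seen) :
    pvStepA n seen acc j =
      (seen ++ [j], acc ++ [j], decide (n ≤ PySem.Set.len seen + 1)) := by
  simp only [pvStepA, PySem.Set.add_of_not_mem h, pv_len_append]
  rw [if_neg (fun hc => h ((PySem.Set.contains_iff seen j).mp hc))]

-- the value both programs produce (proof-side name; m = n // 2 for n ≥ 2)
def pvResult (n s : Int) : List Int :=
  pvAcc n s ((n / 2).toNat - 1) ++
    (if 2 * (n / 2) = n then [PySem.Int.mod (s + n / 2) n]
     else [PySem.Int.mod (s + n / 2) n, PySem.Int.mod (s - n / 2) n])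

-- A's loop invariant: from the state after j full iterations, the loop returns pvResult
theorem pv_loopA_inv {n s : Int} (hn : 2 ≤ n) :
    ∀ d j : Nat, (j : Int) < n / 2 → ((n / 2).toNat - 1 - j = d) →
    pvLoopA n s (PySem.List.pyRange ((j : Int) + 1) n 1) (pvSeen n s j) (pvAcc n s j) =
      pvResult n s := by
  have hn0 : 0 < n := by omega
  have hm1 : 1 ≤ n / 2 := by omega
  have hmn : n / 2 < n := by omega
  have h2m : 2 * (n / 2) ≤ n ∧ n ≤ 2 * (n / 2) + 1 := by omega
  have htn : ((n / 2).toNat : Int) = n / 2 := Int.toNat_of_nonneg (by omega)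
  intro d
  induction d with
  | zero =>
    intro j hj hd
    have hjm : (j : Int) + 1 = n / 2 := by omega
    have hfp := pv_fresh_plus (n := n) (s := s) (j := j) hn0 (by omega)
    have hlen := pv_len_seen (n := n) (s := s) hn0 j (by omega)
    rw [PySem.List.pyRange_one_cons (by omega)]
    by_cases heven : 2 * (n / 2) = n
    · -- n even: len reaches n right after the '+' yield; return
      have hdec1 : decide (n ≤ 2 * (j : Int) + 1 + 1) = true := decide_eq_true (by omega)
      simp only [pvLoopA, pv_stepA_eq hfp, hlen, hdec1]
      simp only [pvResult, if_pos heven]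
      have hjm' : j = (n / 2).toNat - 1 := by omega
      subst hjm'
      rw [hjm]
    · -- n odd: continue to the '-' yield, which reaches n
      have hdec1 : decide (n ≤ 2 * (j : Int) + 1 + 1) = false := decide_eq_false (by omega)
      have hfm := pv_fresh_minus (n := n) (s := s) (j := j) hn0 (by omega)
      have hm2 : PySem.Int.mod (s - ((j : Int) + 1)) n ∉
          pvSeen n s j ++ [PySem.Int.mod (s + ((j : Int) + 1)) n] := by
        rw [← PySem.Set.add_of_not_mem hfp, PySem.Set.mem_add]
        rintro (h | h)
        · exact hfm.1 h
        · exact hfm.2 h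
      have hdec2 : decide (n ≤ 2 * (j : Int) + 1 + 1 + 1) = true := decide_eq_true (by omega)
      simp only [pvLoopA, pv_stepA_eq hfp, hlen, hdec1, pv_stepA_eq hm2, pv_len_append, hdec2]
      simp only [pvResult, if_neg heven]
      have hjm' : j = (n / 2).toNat - 1 := by omega
      subst hjm'
      rw [hjm]
      simp [List.append_assoc]
  | succ d ih =>
    intro j hj hd
    have hjlt : (j : Int) + 1 < n / 2 := by omega
    have hfp := pv_fresh_plus (n := n) (s := s) (j := j) hn0 (by omega)
    have hfm := pv_fresh_minus (n := n) (s := s) (j := j) hn0 (by omega)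
    have hlen := pv_len_seen (n := n) (s := s) hn0 j (by omega)
    rw [PySem.List.pyRange_one_cons (by omega)]
    have hdec1 : decide (n ≤ 2 * (j : Int) + 1 + 1) = false := decide_eq_false (by omega)
    have hm2 : PySem.Int.mod (s - ((j : Int) + 1)) n ∉
        pvSeen n s j ++ [PySem.Int.mod (s + ((j : Int) + 1)) n] := by
      rw [← PySem.Set.add_of_not_mem hfp, PySem.Set.mem_add]
      rintro (h | h)
      · exact hfm.1 h
      · exact hfm.2 h
    have hdec2 : decide (n ≤ 2 * (j : Int) + 1 + 1 + 1) = false := decide_eq_false (by omega)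
    simp only [pvLoopA, pv_stepA_eq hfp, hlen, hdec1, pv_stepA_eq hm2, pv_len_append, hdec2]
    have hseen : pvSeen n s (j + 1) =
        (pvSeen n s j ++ [PySem.Int.mod (s + ((j : Int) + 1)) n]) ++
          [PySem.Int.mod (s - ((j : Int) + 1)) n] := by
      simp only [pvSeen, PySem.Set.add_of_not_mem hfp, PySem.Set.add_of_not_mem hm2]
    have hacc : pvAcc n s (j + 1) =
        (pvAcc n s j ++ [PySem.Int.mod (s + ((j : Int) + 1)) n]) ++
          [PySem.Int.mod (s - ((j : Int) + 1)) n] := by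
      simp [pvAcc, List.append_assoc]
    rw [← hseen, ← hacc]
    have hstep := ih (j + 1) (by push_cast; omega) (by omega)
    rw [show ((j : Int) + 1) + 1 = (((j + 1 : Nat) : Int)) + 1 by push_cast; ring]
    exact hstep

-- B's per-k output chunk
def pvChunk (n s k : Int) : List Int :=
  [PySem.Int.mod (s + k) n] ++
    (if PySem.Int.mod (s - k) n ≠ PySem.Int.mod (s + k) n
     then [PySem.Int.mod (s - k) n] else [])

-- pvAcc is the flatMap of full (two-element) chunks
theorem pv_acc_flat {n s : Int} (hn : 2 ≤ n) :
    ∀ j : Nat, (j : Int) ≤ n / 2 - 1 →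
    pvAcc n s j = s :: (PySem.List.pyRange 1 ((j : Int) + 1) 1).flatMap (pvChunk n s) := by
  have hn0 : 0 < n := by omega
  intro j
  induction j with
  | zero =>
    intro _
    rw [show ((0 : Nat) : Int) + 1 = 1 by norm_num, PySem.List.pyRange_one_eq_nil (le_refl 1)]
    rfl
  | succ j ih =>
    intro hj
    push_cast at hj
    have hfm := pv_fresh_minus (n := n) (s := s) (j := j) hn0 (by omega)
    push_cast
    rw [show (j : Int) + 1 + 1 = ((j : Int) + 1) + 1 by ring,
      PySem.List.pyRange_one_succ_right (by omega), List.flatMap_append,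
      ← List.cons_append, ← ih (by omega)]
    simp only [pvAcc, pvChunk, List.flatMap_cons, List.flatMap_nil, if_pos hfm.2]
    simp [List.append_assoc]

-- B equals pvResult for n ≥ 2
theorem pv_alt_eq_result {n s : Int} (hn : 2 ≤ n) :
    iter_circular_index_zigzag_py_alt n s = pvResult n s := by
  have hn0 : 0 < n := by omega
  have hm1 : 1 ≤ n / 2 := by omega
  have htn : ((n / 2).toNat : Int) = n / 2 := Int.toNat_of_nonneg (by omega)
  unfold iter_circular_index_zigzag_py_alt
  rw [if_neg (by omega), if_neg (by omega), PySem.Int.floordiv_eq_ediv_of_pos (by norm_num)]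
  have hfun : (fun (acc : List Int) (k : Int) =>
        let a := PySem.Int.mod (s + k) n
        let b := PySem.Int.mod (s - k) n
        acc ++ [a] ++ (if b ≠ a then [b] else [])) =
      (fun (acc : List Int) (k : Int) => acc ++ pvChunk n s k) := by
    funext acc k
    simp [pvChunk, List.append_assoc]
  rw [hfun, PySem.List.foldl_append_eq_flatMap]
  rw [PySem.List.pyRange_one_succ_right (by omega), List.flatMap_append]
  have hbody := pv_acc_flat (n := n) (s := s) hn ((n / 2).toNat - 1) (by omega)
  rw [show ((((n / 2).toNat - 1 : Nat) : Int)) + 1 = n / 2 by push_cast; omega] at hbody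
  rw [List.nil_append, ← List.cons_append, ← hbody]
  unfold pvResult
  simp only [List.flatMap_cons, List.flatMap_nil, List.append_nil, pvChunk]
  by_cases heven : 2 * (n / 2) = n
  · have hba : PySem.Int.mod (s - n / 2) n = PySem.Int.mod (s + n / 2) n := by
      rw [PySem.Int.mod_eq_emod_of_pos hn0, PySem.Int.mod_eq_emod_of_pos hn0,
        Int.emod_eq_emod_iff_emod_sub_eq_zero, show s - n / 2 - (s + n / 2) = -n by omega]
      simp
    rw [if_neg (by simp [hba]), if_pos heven]
    simp
  · have hfm := pv_fresh_minus (n := n) (s := s) (j := (n / 2).toNat - 1) hn0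
      (by push_cast; omega)
    rw [show (((((n / 2).toNat - 1 : Nat)) : Int)) + 1 = n / 2 by push_cast; omega] at hfm
    rw [if_pos hfm.2, if_neg heven]
    simp

-- A equals pvResult for n ≥ 2
theorem pv_a_eq_result {n s : Int} (hn : 2 ≤ n) :
    iter_circular_index_zigzag_py n s = pvResult n s := by
  unfold iter_circular_index_zigzag_py
  rw [if_neg (by omega), if_neg (by omega)]
  have := pv_loopA_inv (n := n) (s := s) hn ((n / 2).toNat - 1 - 0) 0 (by omega) rfl
  simpa [pvSeen, pvAcc] using this

-- ===== VERDICT (by name: the statement is the Claim_ definition above) =====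
theorem iter_circular_index_zigzag_py_spec : Claim_equal_iter_circular_index_zigzag_py := by
  intro n s _
  unfold Spec_iter_circular_index_zigzag_py
  by_cases h0 : n = 0
  · subst h0; rfl
  · by_cases h1 : n = 1
    · subst h1; rfl
    · by_cases h2 : 2 ≤ n
      · rw [pv_a_eq_result h2, pv_alt_eq_result h2]
      · -- n ≤ -1: both ranges are empty, both return [s]
        unfold iter_circular_index_zigzag_py iter_circular_index_zigzag_py_alt
        rw [if_neg h0, if_neg h1, if_neg h0, if_neg h1,
          PySem.List.pyRange_one_eq_nil (by omega),
          PySem.List.pyRange_one_eq_nil (by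
            have := PySem.Int.floordiv_mul_add_mod n 2
            have hb1 := PySem.Int.mod_nonneg n (by norm_num : (0:Int) < 2)
            have hb2 := PySem.Int.mod_lt n (by norm_num : (0:Int) < 2)
            omega)]
        rfl
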